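-- pv_equiv track=rewrite | github.com/gdahlm/aoc | 2024/python/aoc/day15.py | look_ahead
-- ===== SOURCE A (Python) =====
-- CHARS = {
--     "robot": "@",
--     "box": "O",
--     "wall": "#",
--     "empty": ".",
-- }
--
-- def tuple_sum(a: tuple, b: tuple):
--     return tuple(sum(x) for x in zip(a, b))
--
-- def look_ahead(board, location, move_mask, res=None):
--     """See if boxes can move"""
--     rows, cols = len(board), len(board[0])
--     if res is None:
--         res = []
--     if not isinstance(move_mask, tuple) or not isinstance(location, tuple):
--         return res
--
--     next_loc = tuple_sum(location, move_mask)
--     new_row, new_col = next_loc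
--     if rows >= new_row < 0 or cols >= new_col < 0:
--         return res
--
--     new_char = board[new_row][new_col]
--
--     if new_char == CHARS["wall"]:
--         return res
--
--     res.extend(new_char)
--
--     _ = look_ahead(board, (new_row, new_col), move_mask)
--     res.extend(_.copy())
--
--     return res
-- ===== SOURCE B (Python) =====
-- # Iterative re-implementation: one while-loop stepping a (row, col) cursor,
-- # appending each seen char, instead of A's recursion that re-copies and
-- # re-concatenates the suffix list at every level.
-- # Like A, it appends into the caller-supplied res in place.
-- def look_ahead(board, location, move_mask, res=None):
--     """See if boxes can move"""
--     if res is None: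
--         res = []
--     row, col = location
--     d_row, d_col = move_mask
--     while True:
--         row, col = row + d_row, col + d_col
--         if row < 0 or col < 0:
--             return res
--         ch = board[row][col]
--         if ch == "#":
--             return res
--         res.append(ch)
-- ===== Notes on version B (the rewrite author's own statement) =====
-- stated objective: simpler
-- what changed: A's tail recursion (which at every level starts a fresh list, then copies and re-appends the whole recursive result) is replaced by a single while-loop that advances a (row, col) cursor and appends each character once; the chained bounds check rows >= new_row < 0 simplifies to row < 0 since rows is never negative.
import Mathlib
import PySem

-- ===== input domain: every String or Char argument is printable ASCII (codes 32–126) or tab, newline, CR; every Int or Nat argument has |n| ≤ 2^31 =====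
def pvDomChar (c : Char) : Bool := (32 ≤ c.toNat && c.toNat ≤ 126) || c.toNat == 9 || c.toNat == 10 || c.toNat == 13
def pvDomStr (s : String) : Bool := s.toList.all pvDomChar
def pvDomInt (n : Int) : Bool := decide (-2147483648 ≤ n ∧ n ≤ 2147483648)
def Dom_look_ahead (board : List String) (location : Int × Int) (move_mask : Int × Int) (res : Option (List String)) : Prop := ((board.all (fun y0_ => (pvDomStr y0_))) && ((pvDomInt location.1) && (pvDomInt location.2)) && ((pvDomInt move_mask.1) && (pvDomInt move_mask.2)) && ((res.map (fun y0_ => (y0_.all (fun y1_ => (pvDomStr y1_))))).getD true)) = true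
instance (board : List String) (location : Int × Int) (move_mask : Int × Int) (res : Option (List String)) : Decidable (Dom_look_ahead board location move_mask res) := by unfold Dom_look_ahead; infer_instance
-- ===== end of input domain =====

-- ===== PORT A =====
-- Equivalence is about the RETURN value only: both Pythons also extend the
-- caller-supplied `res` list in place (same net mutation on Pre_ inputs).

-- tuple_sum(a, b) specialised to pairs of ints (the only use in look_ahead)
def pvTupleSum (a b : Int × Int) : Int × Int := (a.1 + b.1, a.2 + b.2)

-- board[r][c]: none exactly where Python raises IndexError (excluded by Pre_)
def pvCellA (board : List String) (r c : Int) : Option Char :=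
  (PySem.List.pyGet? board r).bind fun row => PySem.Str.pyGet? row c

-- fuel guard only (A's Python recursion is unbounded); inside Pre_ the walk
-- stops within this many steps, so the guard is never reached there
def pvFuel (board : List String) : Nat :=
  board.length + board.foldr (fun s m => max s.toList.length m) 0 + 2

-- literal transliteration of A's recursive body; the isinstance guard is
-- always false under the port's types (location/move_mask are pairs)
def lookAheadA (fuel : Nat) (board : List String) (location : Int × Int)
    (move_mask : Int × Int) (res : List String) : List String :=
  match fuel with
  | 0 => res
  | Nat.succ f =>
    let rows : Int := (board.length : Int)
    let cols : Int := (((PySem.List.pyGet? board 0).getD "").toList.length : Int)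
    let next_loc := pvTupleSum location move_mask
    let new_row := next_loc.1
    let new_col := next_loc.2
    if (rows ≥ new_row ∧ new_row < 0) ∨ (cols ≥ new_col ∧ new_col < 0) then res
    else
      match pvCellA board new_row new_col with
      | none => res   -- Python raises IndexError here; excluded by Pre_
      | some new_char =>
        if new_char = '#' then res
        else
          let res := res ++ [String.ofList [new_char]]   -- res.extend(new_char)
          res ++ lookAheadA f board next_loc move_mask []   -- res.extend(look_ahead(...).copy())

def look_ahead (board : List String) (location : Int × Int) (move_mask : Int × Int) (res : Option (List String)) : List String :=
  lookAheadA (pvFuel board) board location move_mask (res.getD [])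

-- ===== PORT B =====
-- literal transliteration of Source B's while-loop (cursor + accumulator); the
-- same fuel guard makes the loop total
def lookAheadB (fuel : Nat) (board : List String) (location : Int × Int)
    (move_mask : Int × Int) (res : List String) : List String :=
  match fuel with
  | 0 => res
  | Nat.succ f =>
    let row := location.1 + move_mask.1
    let col := location.2 + move_mask.2
    if row < 0 ∨ col < 0 then res
    else
      match pvCellA board row col with
      | none => res   -- Python raises IndexError here; excluded by Pre_
      | some ch =>
        if ch = '#' then res
        else lookAheadB f board (row, col) move_mask (res ++ [String.ofList [ch]])

def look_ahead_alt (board : List String) (location : Int × Int) (move_mask : Int × Int) (res : Option (List String)) : List String :=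
  lookAheadB (pvFuel board) board location move_mask (res.getD [])

-- ===== PRECONDITION & SPEC =====
-- helpers for Pre_: position after k steps, and the cell there (meaningful for
-- non-negative coordinates, which Pre_'s uses guarantee)
def pvPos (location move_mask : Int × Int) (k : Nat) : Int × Int :=
  (location.1 + (k : Int) * move_mask.1, location.2 + (k : Int) * move_mask.2)

def pvAt (board : List String) (p : Int × Int) : Option Char :=
  (board[p.1.toNat]?).bind fun s => s.toList[p.2.toNat]?

-- step j can be taken: in range and not a wall
def pvCont (board : List String) (p : Int × Int) : Prop :=
  0 ≤ p.1 ∧ 0 ≤ p.2 ∧ pvAt board p ≠ none ∧ pvAt board p ≠ some '#'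

-- step k stops the walk normally: a negative coordinate or a wall
def pvGood (board : List String) (p : Int × Int) : Prop :=
  p.1 < 0 ∨ p.2 < 0 ∨ (0 ≤ p.1 ∧ 0 ≤ p.2 ∧ pvAt board p = some '#')

-- Pre_ excludes exactly the inputs where the Python A raises or diverges:
-- an empty board (board[0] raises IndexError), a walk that runs off the
-- bottom/right edge (the quirky bounds check misses it, so indexing raises
-- IndexError), and a walk that never stops (move_mask (0,0) on a non-wall
-- cell, infinite recursion). Inside Pre_ the walk stops, within pvFuel steps.
def Pre_look_ahead (board : List String) (location : Int × Int) (move_mask : Int × Int) (res : Option (List String)) : Prop :=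
  board ≠ [] ∧
  ∃ k < pvFuel board + 1, 1 ≤ k ∧ pvGood board (pvPos location move_mask k) ∧
    ∀ j < k, 1 ≤ j → pvCont board (pvPos location move_mask j)

instance (board : List String) (location : Int × Int) (move_mask : Int × Int) (res : Option (List String)) : Decidable (Pre_look_ahead board location move_mask res) := by
  unfold Pre_look_ahead pvGood pvCont; infer_instance

def pvWitness_look_ahead : List String × (Int × Int) × (Int × Int) × Option (List String) :=
  (["..#.", "...."], (0, 0), (0, 1), none)

def Spec_look_ahead (board : List String) (location : Int × Int) (move_mask : Int × Int) (res : Option (List String)) (out : List String) : Prop := out = look_ahead_alt board location move_mask res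
instance (board : List String) (location : Int × Int) (move_mask : Int × Int) (res : Option (List String)) (out : List String) : Decidable (Spec_look_ahead board location move_mask res out) := by unfold Spec_look_ahead; infer_instance

-- ===== CLAIM (what is proved, stated in full; the proofs are below) =====
def Claim_equal_look_ahead : Prop := ∀ (board : List String) (location : Int × Int) (move_mask : Int × Int) (res : Option (List String)), Dom_look_ahead board location move_mask res → Pre_look_ahead board location move_mask res → Spec_look_ahead board location move_mask res (look_ahead board location move_mask res)

-- ===== LEMMAS AND PROOFS =====

-- B's loop accumulator factors out
theorem lookAheadB_acc (fuel : Nat) :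
    ∀ (board : List String) (location move_mask : Int × Int) (res : List String),
      lookAheadB fuel board location move_mask res = res ++ lookAheadB fuel board location move_mask [] := by
  induction fuel with
  | zero => intro board location move_mask res; simp [lookAheadB]
  | succ f ih =>
    intro board location move_mask res
    simp only [lookAheadB]
    split
    · simp
    · rename_i h
      cases hc : pvCellA board (location.1 + move_mask.1) (location.2 + move_mask.2) with
      | none => simp
      | some ch =>
        by_cases hch : ch = '#'
        · simp [hch]
        · simp only [hch, if_false]
          rw [ih _ _ _ (res ++ [String.ofList [ch]]), ih _ _ _ ([] ++ [String.ofList [ch]])]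
          simp

-- the two loop bodies agree for every fuel (A's quirky chained bounds check
-- 'rows >= r < 0 or cols >= c < 0' equals 'r < 0 or c < 0' since rows, cols ≥ 0)
theorem lookAhead_agree (fuel : Nat) :
    ∀ (board : List String) (location move_mask : Int × Int) (res : List String),
      lookAheadA fuel board location move_mask res = lookAheadB fuel board location move_mask res := by
  induction fuel with
  | zero => intro board location move_mask res; simp [lookAheadA, lookAheadB]
  | succ f ih =>
    intro board location move_mask res
    simp only [lookAheadA, lookAheadB, pvTupleSum]
    have hrows : (0 : Int) ≤ (board.length : Int) := by positivity
    have hcols : (0 : Int) ≤ ((((PySem.List.pyGet? board 0).getD "").toList.length : Int)) := by positivity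
    have hguard : (((board.length : Int) ≥ location.1 + move_mask.1 ∧ location.1 + move_mask.1 < 0) ∨
        ((((PySem.List.pyGet? board 0).getD "").toList.length : Int) ≥ location.2 + move_mask.2 ∧ location.2 + move_mask.2 < 0))
        ↔ (location.1 + move_mask.1 < 0 ∨ location.2 + move_mask.2 < 0) := by
      constructor
      · rintro (⟨_, h⟩ | ⟨_, h⟩) <;> [left; right] <;> exact h
      · rintro (h | h) <;> [left; right] <;> exact ⟨by omega, h⟩
    by_cases hg : location.1 + move_mask.1 < 0 ∨ location.2 + move_mask.2 < 0
    · rw [if_pos (hguard.mpr hg), if_pos hg]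
    · rw [if_neg (fun h => hg (hguard.mp h)), if_neg hg]
      cases hc : pvCellA board (location.1 + move_mask.1) (location.2 + move_mask.2) with
      | none => rfl
      | some ch =>
        by_cases hch : ch = '#'
        · simp [hch]
        · simp only [hch, if_false]
          rw [ih, lookAheadB_acc f board _ _ (res ++ [String.ofList [ch]])]

-- ===== VERDICT (by name: the statement is the Claim_ definition above) =====
theorem look_ahead_spec : Claim_equal_look_ahead := by
  intro board location move_mask res _ _
  unfold Spec_look_ahead look_ahead look_ahead_alt
  exact lookAhead_agree _ board location move_mask _
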